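-- pv_equiv track=rewrite | github.com/andr-kun/aoc2023 | puzzle_13/solution.py | find_horizontal_reflection_bounded
-- ===== SOURCE A (Python) =====
-- def find_horizontal_reflection_bounded(pattern):
--     for start in range(len(pattern) - 1):
--         for end in range(start + 1, len(pattern), 2):
--             mid = (end - start + 1) // 2
--             if ''.join(pattern[start:start + mid]) == ''.join(pattern[start + mid:end + 1][::-1]):
--                 if start == 0 or end == len(pattern)-1:
--                     return start + mid
--     return 0
-- ===== SOURCE B (Python) =====
-- def find_horizontal_reflection_bounded(pattern):
--     # Only boundary-anchored reflections can be returned, so test just the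
--     # O(n) top-anchored candidates first (A's start == 0 pass, in order),
--     # then the bottom-anchored candidates (A's end == n-1 hits, in order).
--     n = len(pattern)
--     for end in range(1, n, 2):
--         mid = (end + 1) // 2
--         if ''.join(pattern[0:mid]) == ''.join(pattern[mid:end + 1][::-1]):
--             return mid
--     for start in range(1, n - 1):
--         if (n - start) % 2 == 0:
--             mid = (n - start) // 2
--             if ''.join(pattern[start:start + mid]) == ''.join(pattern[start + mid:n][::-1]):
--                 return start + mid
--     return 0
-- ===== Notes on version B (the rewrite author's own statement) =====
-- stated objective: faster
-- what changed: A scans all O(n^2) (start,end) pairs and filters for boundary contact at match time; B enumerates only the O(n) boundary-anchored candidates (top-anchored first, then bottom-anchored), preserving A's return order.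
import Mathlib
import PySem

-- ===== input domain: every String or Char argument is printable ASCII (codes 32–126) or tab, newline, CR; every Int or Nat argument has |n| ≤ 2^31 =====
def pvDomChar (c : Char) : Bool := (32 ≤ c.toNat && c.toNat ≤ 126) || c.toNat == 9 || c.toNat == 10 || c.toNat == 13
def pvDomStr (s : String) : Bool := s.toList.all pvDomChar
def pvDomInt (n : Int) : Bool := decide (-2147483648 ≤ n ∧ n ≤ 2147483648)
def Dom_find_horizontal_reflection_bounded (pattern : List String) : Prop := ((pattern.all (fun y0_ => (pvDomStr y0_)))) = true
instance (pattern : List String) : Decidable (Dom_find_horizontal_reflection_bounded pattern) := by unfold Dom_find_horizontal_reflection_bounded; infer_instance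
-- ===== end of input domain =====

-- B restricts the search to the O(n) boundary-anchored reflection candidates (A's nested
-- scan tries all O(n^2) (start,end) pairs but can only ever return a boundary-touching one);
-- objective: faster, same return value everywhere.

-- ===== PORT A =====
-- literal transliteration of A; pattern[x:y] → PySem.List.slice, [::-1] → .reverse
-- (PySem.List.slice?_none_none_neg_one), // → PySem.Int.floordiv, ''.join → PySem.Str.join.
def find_horizontal_reflection_bounded (pattern : List String) : Int :=
  let n : Int := pattern.length
  ((PySem.List.pyRange 0 (n - 1)).findSome? (fun start =>
    (PySem.List.pyRange (start + 1) n 2).findSome? (fun e =>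
      let mid := PySem.Int.floordiv (e - start + 1) 2
      if PySem.Str.join "" (PySem.List.slice pattern (some start) (some (start + mid)))
          = PySem.Str.join "" ((PySem.List.slice pattern (some (start + mid)) (some (e + 1))).reverse)
      then (if start = 0 ∨ e = n - 1 then some (start + mid) else none)
      else none))).getD 0

-- ===== PORT B =====
-- literal transliteration of Source B: first loop = top-anchored candidates, second loop =
-- bottom-anchored candidates; % → PySem.Int.mod, the rest as in port A.
def find_horizontal_reflection_bounded_alt (pattern : List String) : Int :=
  let n : Int := pattern.length
  match (PySem.List.pyRange 1 n 2).findSome? (fun e =>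
      let mid := PySem.Int.floordiv (e + 1) 2
      if PySem.Str.join "" (PySem.List.slice pattern (some 0) (some mid))
          = PySem.Str.join "" ((PySem.List.slice pattern (some mid) (some (e + 1))).reverse)
      then some mid else none) with
  | some r => r
  | none =>
    ((PySem.List.pyRange 1 (n - 1)).findSome? (fun start =>
      if PySem.Int.mod (n - start) 2 = 0 then
        let mid := PySem.Int.floordiv (n - start) 2
        if PySem.Str.join "" (PySem.List.slice pattern (some start) (some (start + mid)))
            = PySem.Str.join "" ((PySem.List.slice pattern (some (start + mid)) (some n)).reverse)
        then some (start + mid) else none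
      else none)).getD 0

-- ===== PRECONDITION & SPEC =====
def Spec_find_horizontal_reflection_bounded (pattern : List String) (out : Int) : Prop := out = find_horizontal_reflection_bounded_alt pattern
instance (pattern : List String) (out : Int) : Decidable (Spec_find_horizontal_reflection_bounded pattern out) := by unfold Spec_find_horizontal_reflection_bounded; infer_instance

-- ===== CLAIM (what is proved, stated in full; the proofs are below) =====
def Claim_equal_find_horizontal_reflection_bounded : Prop := ∀ (pattern : List String), Dom_find_horizontal_reflection_bounded pattern → Spec_find_horizontal_reflection_bounded pattern (find_horizontal_reflection_bounded pattern)

-- ===== LEMMAS AND PROOFS =====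

-- findSome? only looks at the values of f on members of the list
theorem pvFindSome?_congr_mem {α β : Type} {l : List α} {f g : α → Option β}
    (h : ∀ x ∈ l, f x = g x) : l.findSome? f = l.findSome? g := by
  induction l with
  | nil => rfl
  | cons a t ih =>
    simp only [List.findSome?_cons, h a (by simp)]
    cases g a with
    | some b => rfl
    | none => exact ih (fun x hx => h x (by simp [hx]))

-- if f vanishes away from t, findSome? is a lookup at t
theorem pvFindSome?_single {β : Type} {l : List Int} {f : Int → Option β} {t : Int}
    (h : ∀ e ∈ l, e ≠ t → f e = none) :
    l.findSome? f = if t ∈ l then f t else none := by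
  induction l with
  | nil => simp
  | cons a tl ih =>
    by_cases ha : a = t
    · subst ha
      simp only [List.findSome?_cons]
      cases hfa : f a with
      | some b => simp
      | none =>
        rw [ih (fun e he hne => h e (by simp [he]) hne)]
        by_cases htl : a ∈ tl <;> simp [htl, hfa]
    · rw [List.findSome?_cons, h a (by simp) ha,
        ih (fun e he hne => h e (by simp [he]) hne)]
      have : ¬ t = a := fun h' => ha h'.symm
      simp [this]

-- the inner scan of A for a start ≥ 1 returns a value only at end = n-1,
-- and does so exactly under B's parity + match test
theorem pvInner (pattern : List String) (n start : Int) (h1 : 1 ≤ start) (h2 : start < n - 1) :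
    (PySem.List.pyRange (start + 1) n 2).findSome? (fun e =>
      let mid := PySem.Int.floordiv (e - start + 1) 2
      if PySem.Str.join "" (PySem.List.slice pattern (some start) (some (start + mid)))
          = PySem.Str.join "" ((PySem.List.slice pattern (some (start + mid)) (some (e + 1))).reverse)
      then (if start = 0 ∨ e = n - 1 then some (start + mid) else none)
      else none) =
    (if PySem.Int.mod (n - start) 2 = 0 then
        let mid := PySem.Int.floordiv (n - start) 2
        if PySem.Str.join "" (PySem.List.slice pattern (some start) (some (start + mid)))
            = PySem.Str.join "" ((PySem.List.slice pattern (some (start + mid)) (some n)).reverse)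
        then some (start + mid) else none
      else none) := by
  rw [pvFindSome?_single (t := n - 1) (by
    intro e _ hne
    have hs : ¬ (start = 0 ∨ e = n - 1) := by
      rintro (h | h) <;> [omega; exact hne h]
    simp only [hs, if_false]
    split <;> rfl)]
  have hmem : ((n - 1) ∈ PySem.List.pyRange (start + 1) n 2) ↔ (2 ∣ (n - start)) := by
    rw [PySem.List.mem_pyRange_iff_of_pos (by norm_num)]
    omega
  have hmod : (PySem.Int.mod (n - start) 2 = 0) ↔ (2 ∣ (n - start)) := by
    simp only [PySem.Int.mod, Int.fmod_eq_emod]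
    omega
  by_cases hd : 2 ∣ (n - start)
  · rw [if_pos (hmem.mpr hd), if_pos (hmod.mpr hd)]
    have e1 : n - 1 - start + 1 = n - start := by ring
    have e2 : n - 1 + 1 = n := by ring
    have e3 : ¬ start = 0 := by omega
    simp only [e1, e2, e3, false_or, if_true]
  · rw [if_neg (fun h => hd (hmem.mp h)), if_neg (fun h => hd (hmod.mp h))]

theorem pvMain : ∀ (pattern : List String),
    find_horizontal_reflection_bounded pattern = find_horizontal_reflection_bounded_alt pattern := by
  intro pattern
  simp only [find_horizontal_reflection_bounded, find_horizontal_reflection_bounded_alt]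
  set n : Int := (pattern.length : Int) with hn
  by_cases hsmall : n < 2
  · have r1 : PySem.List.pyRange 0 (n - 1) = [] :=
      PySem.List.pyRange_one_eq_nil (by omega)
    have r2 : PySem.List.pyRange 1 n 2 = [] := by
      rw [PySem.List.pyRange_of_pos _ _ (by norm_num)]
      rw [if_neg (by omega)]
      rfl
    have r3 : PySem.List.pyRange 1 (n - 1) = [] :=
      PySem.List.pyRange_one_eq_nil (by omega)
    rw [r1, r2, r3]
    rfl
  · rw [PySem.List.pyRange_one_cons (show (0 : Int) < n - 1 by omega), List.findSome?_cons]
    have hfirst : (PySem.List.pyRange (0 + 1) n 2).findSome? (fun e =>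
        let mid := PySem.Int.floordiv (e - 0 + 1) 2
        if PySem.Str.join "" (PySem.List.slice pattern (some 0) (some (0 + mid)))
            = PySem.Str.join "" ((PySem.List.slice pattern (some (0 + mid)) (some (e + 1))).reverse)
        then (if (0 : Int) = 0 ∨ e = n - 1 then some (0 + mid) else none)
        else none) =
        (PySem.List.pyRange 1 n 2).findSome? (fun e =>
        let mid := PySem.Int.floordiv (e + 1) 2
        if PySem.Str.join "" (PySem.List.slice pattern (some 0) (some mid))
            = PySem.Str.join "" ((PySem.List.slice pattern (some mid) (some (e + 1))).reverse)
        then some mid else none) := by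
      norm_num
    rw [hfirst]
    have hrest : (PySem.List.pyRange (0 + 1) (n - 1)).findSome? (fun start =>
        (PySem.List.pyRange (start + 1) n 2).findSome? (fun e =>
          let mid := PySem.Int.floordiv (e - start + 1) 2
          if PySem.Str.join "" (PySem.List.slice pattern (some start) (some (start + mid)))
              = PySem.Str.join "" ((PySem.List.slice pattern (some (start + mid)) (some (e + 1))).reverse)
          then (if start = 0 ∨ e = n - 1 then some (start + mid) else none)
          else none)) =
        (PySem.List.pyRange 1 (n - 1)).findSome? (fun start =>
          if PySem.Int.mod (n - start) 2 = 0 then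
            let mid := PySem.Int.floordiv (n - start) 2
            if PySem.Str.join "" (PySem.List.slice pattern (some start) (some (start + mid)))
                = PySem.Str.join "" ((PySem.List.slice pattern (some (start + mid)) (some n)).reverse)
            then some (start + mid) else none
          else none) := by
      rw [show (0 : Int) + 1 = 1 by norm_num]
      apply pvFindSome?_congr_mem
      intro start hst
      rw [PySem.List.mem_pyRange_one] at hst
      exact pvInner pattern n start hst.1 hst.2
    rw [hrest]
    cases (PySem.List.pyRange 1 n 2).findSome? (fun e =>
        let mid := PySem.Int.floordiv (e + 1) 2
        if PySem.Str.join "" (PySem.List.slice pattern (some 0) (some mid))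
            = PySem.Str.join "" ((PySem.List.slice pattern (some mid) (some (e + 1))).reverse)
        then some mid else none) with
    | some r => rfl
    | none => rfl

-- ===== VERDICT (by name: the statement is the Claim_ definition above) =====
theorem find_horizontal_reflection_bounded_spec : Claim_equal_find_horizontal_reflection_bounded := by
  intro pattern _
  exact pvMain pattern
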